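-- pv_equiv track=rewrite | github.com/dericklde/fit3155 | A2/a2.py | naive_implicit_suffix_tree
-- ===== SOURCE A (Python) =====
-- def naive_implicit_suffix_tree(text):
--     n = len(text)
--     suffix_tree = {}
--
--     # Construct I_1
--     suffix_tree[(0, 0)] = {"leaf" : 0}  # each text file contains at least one character (no need to check n > 0)
--
--     for i in range(1, n):               # 1 as I1 already constructed
--         # begin phase i+1
--         for j in range(i+1):
--             substring_exist = False     # flag to check if substring of suffix already exist for extension decision
--
--             for (start_index, end_index) in suffix_tree:                        # (start index of text, end index of text) tuple contains pointers to the original text string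
--                 if text[start_index : end_index + 1] == text[j : i + 1]:        # check if there is an existing path for the substring in the suffix tree
--                     substring_exist = True
--                     break
--
--             if substring_exist == False:                                        # rule 2 extension
--                 suffix_tree[(j, i)] = {"leaf": j}
--
--     return suffix_tree
-- ===== SOURCE B (Python) =====
-- def naive_implicit_suffix_tree(text):
--     # Stateless characterization: key (j, i) is stored exactly when j is the
--     # leftmost occurrence of text[j:i+1] in text; nothing is scanned or maintained.
--     n = len(text)
--     suffix_tree = {(0, 0): {"leaf": 0}}
--     suffix_tree.update({(j, i): {"leaf": j}
--                         for i in range(1, n)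
--                         for j in range(i + 1)
--                         if text.find(text[j:i + 1]) == j})
--     return suffix_tree
-- ===== Notes on version B (the rewrite author's own statement) =====
-- stated objective: faster
-- what changed: Replaces A's incremental dict of seen substrings with its inner scan over all stored keys by a stateless first-occurrence test: (j,i) is kept iff text.find(text[j:i+1]) == j, so no membership structure is maintained or scanned.
import Mathlib
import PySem

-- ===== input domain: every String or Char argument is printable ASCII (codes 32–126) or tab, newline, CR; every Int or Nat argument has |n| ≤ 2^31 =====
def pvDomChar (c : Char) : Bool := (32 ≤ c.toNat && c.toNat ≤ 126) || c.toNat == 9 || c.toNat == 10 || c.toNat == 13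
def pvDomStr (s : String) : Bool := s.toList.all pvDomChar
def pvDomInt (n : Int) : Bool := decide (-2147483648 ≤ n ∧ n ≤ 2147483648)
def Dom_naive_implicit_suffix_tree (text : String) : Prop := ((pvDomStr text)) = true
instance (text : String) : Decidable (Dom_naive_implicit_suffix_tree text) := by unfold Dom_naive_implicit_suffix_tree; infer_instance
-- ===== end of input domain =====

-- B replaces A's scan over all stored keys by a stateless leftmost-occurrence test
-- (text.find(text[j:i+1]) == j); objective: faster (no growing dict is scanned).

-- ===== PORT A =====
-- A's inner-loop body (flag scan over the stored keys, then the rule-2 insert), named for the proofs.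
def pvStepA (text : String) (i : Int)
    (suffix_tree : PySem.Dict (Int × Int) (List (String × Int))) (j : Int) :
    PySem.Dict (Int × Int) (List (String × Int)) :=
  let substring_exist := suffix_tree.keys.any (fun se =>
    PySem.Str.slice text (some se.1) (some (se.2 + 1)) == PySem.Str.slice text (some j) (some (i + 1)))
  if substring_exist = false then suffix_tree.insert (j, i) [("leaf", j)] else suffix_tree

def naive_implicit_suffix_tree (text : String) : List (Int × Int × List (String × Int)) :=
  let n : Int := PySem.Str.len text
  let suffix_tree : PySem.Dict (Int × Int) (List (String × Int)) :=
    PySem.Dict.empty.insert (0, 0) [("leaf", 0)]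
  let suffix_tree := (PySem.List.pyRange 1 n).foldl (fun st i =>
    (PySem.List.pyRange 0 (i + 1)).foldl (pvStepA text i) st) suffix_tree
  suffix_tree.items.map (fun kv => (kv.1.1, kv.1.2, kv.2))

-- ===== PORT B =====
def naive_implicit_suffix_tree_alt (text : String) : List (Int × Int × List (String × Int)) :=
  let n : Int := PySem.Str.len text
  let suffix_tree : PySem.Dict (Int × Int) (List (String × Int)) :=
    PySem.Dict.empty.insert (0, 0) [("leaf", 0)]
  let upd := (PySem.List.pyRange 1 n).flatMap (fun i =>
    (PySem.List.pyRange 0 (i + 1)).filterMap (fun j =>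
      if PySem.Str.find text (PySem.Str.slice text (some j) (some (i + 1))) == j
      then some ((j, i), [("leaf", j)]) else none))
  (suffix_tree.update upd).items.map (fun kv => (kv.1.1, kv.1.2, kv.2))

-- ===== PRECONDITION & SPEC =====
def Spec_naive_implicit_suffix_tree (text : String) (out : List (Int × Int × List (String × Int))) : Prop := out = naive_implicit_suffix_tree_alt text
instance (text : String) (out : List (Int × Int × List (String × Int))) : Decidable (Spec_naive_implicit_suffix_tree text out) := by unfold Spec_naive_implicit_suffix_tree; infer_instance

-- ===== CLAIM (what is proved, stated in full; the proofs are below) =====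
def Claim_equal_naive_implicit_suffix_tree : Prop := ∀ (text : String), Dom_naive_implicit_suffix_tree text → Spec_naive_implicit_suffix_tree text (naive_implicit_suffix_tree text)

-- ===== LEMMAS AND PROOFS =====

-- text[j:i+1] on the character-list level
def pvSub (cs : List Char) (j i : ℕ) : List Char := (cs.drop j).take (i + 1 - j)
-- "j is the leftmost occurrence of text[j:i+1]"
def pvNew (cs : List Char) (j i : ℕ) : Bool := decide (∀ p < j, ¬ pvSub cs j i <+: cs.drop p)
def pvEnt (j i : ℕ) : (Int × Int) × List (String × Int) := (((j : ℤ), (i : ℤ)), [("leaf", (j : ℤ))])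
-- the entries produced at end position i for starts j < t
def pvRow (cs : List Char) (i t : ℕ) : List ((Int × Int) × List (String × Int)) :=
  (List.range t).filterMap (fun j => if pvNew cs j i then some (pvEnt j i) else none)
-- all complete rows for end positions 1 .. m
def pvUp (cs : List Char) (m : ℕ) : List ((Int × Int) × List (String × Int)) :=
  (List.range' 1 m).flatMap (fun i => pvRow cs i (i + 1))

lemma pvSub_len {cs : List Char} {j i : ℕ} (hj : j ≤ i) (hi : i < cs.length) :
    (pvSub cs j i).length = i + 1 - j := by
  simp [pvSub]; omega

lemma pvSub_prefix (cs : List Char) (j i : ℕ) : pvSub cs j i <+: cs.drop j :=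
  List.take_prefix _ _

lemma pvSub_eq_of_prefix {cs : List Char} {j i p : ℕ} (hj : j ≤ i) (hi : i < cs.length)
    (h : pvSub cs j i <+: cs.drop p) : pvSub cs p (p + (i - j)) = pvSub cs j i := by
  have h2 : pvSub cs j i = (cs.drop p).take (i + 1 - j) := by
    have := List.prefix_iff_eq_take.mp h
    rwa [pvSub_len hj hi] at this
  show (cs.drop p).take (p + (i - j) + 1 - p) = pvSub cs j i
  rw [h2]; congr 1; omega

lemma pvFind_eq_iff {cs : List Char} {j i : ℕ} (hj : j ≤ i) (hi : i < cs.length) :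
    (PySem.Chars.find cs (pvSub cs j i) = (j : ℤ)) ↔ pvNew cs j i = true := by
  have hoccj : pvSub cs j i <+: cs.drop j := pvSub_prefix cs j i
  have hinf : pvSub cs j i <:+: cs := hoccj.isInfix.trans (List.drop_suffix j cs).isInfix
  have hnonneg : 0 ≤ PySem.Chars.find cs (pvSub cs j i) := (PySem.Chars.find_nonneg_iff _ _).mpr hinf
  obtain ⟨hpre, hmin⟩ := PySem.Chars.find_spec hnonneg
  have hle : (PySem.Chars.find cs (pvSub cs j i)).toNat ≤ j := by
    by_contra hgt
    push_neg at hgt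
    exact hmin j hgt hoccj
  constructor
  · intro h
    apply decide_eq_true
    intro p hp hpp
    have hpj : p < (PySem.Chars.find cs (pvSub cs j i)).toNat := by omega
    exact hmin p hpj hpp
  · intro hnew
    have hnew' := of_decide_eq_true hnew
    have hge : ¬ (PySem.Chars.find cs (pvSub cs j i)).toNat < j := fun hlt => hnew' _ hlt hpre
    omega

lemma pvSliceToList (text : String) (a b : ℕ) :
    (PySem.Str.slice text (some (a : ℤ)) (some ((b : ℤ) + 1))).toList = pvSub text.toList a b := by
  have h0 : (PySem.Str.slice text (some (a : ℤ)) (some ((b : ℤ) + 1))).toList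
      = PySem.List.slice text.toList (some (a : ℤ)) (some ((b : ℤ) + 1)) := by
    simp [PySem.Str.slice]
  have h : ((b : ℤ) + 1) = ((b + 1 : ℕ) : ℤ) := by push_cast; ring
  rw [h0, h, PySem.List.slice_natCast]
  simp [pvSub]

lemma pvCondB (text : String) {j i : ℕ} (hj : j ≤ i) (hi : i < text.toList.length) :
    (PySem.Str.find text (PySem.Str.slice text (some (j : ℤ)) (some ((i : ℤ) + 1))) == (j : ℤ))
      = pvNew text.toList j i := by
  rcases h : pvNew text.toList j i with _ | _
  · apply beq_eq_false_iff_ne.mpr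
    intro heq
    rw [PySem.Str.find_eq, pvSliceToList] at heq
    have := (pvFind_eq_iff hj hi).mp heq
    rw [h] at this
    cases this
  · apply beq_iff_eq.mpr
    rw [PySem.Str.find_eq, pvSliceToList]
    exact (pvFind_eq_iff hj hi).mpr h

lemma pvSliceEq (text : String) (a b c e : ℕ) :
    (PySem.Str.slice text (some (a : ℤ)) (some ((b : ℤ) + 1))
       == PySem.Str.slice text (some (c : ℤ)) (some ((e : ℤ) + 1)))
      = decide (pvSub text.toList a b = pvSub text.toList c e) := by
  by_cases hP : pvSub text.toList a b = pvSub text.toList c e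
  · have hs : PySem.Str.slice text (some (a : ℤ)) (some ((b : ℤ) + 1))
        = PySem.Str.slice text (some (c : ℤ)) (some ((e : ℤ) + 1)) := by
      apply String.toList_inj.mp
      rw [pvSliceToList, pvSliceToList, hP]
    simp [hs, hP]
  · have hs : PySem.Str.slice text (some (a : ℤ)) (some ((b : ℤ) + 1))
        ≠ PySem.Str.slice text (some (c : ℤ)) (some ((e : ℤ) + 1)) := by
      intro he
      exact hP (by rw [← pvSliceToList text a b, ← pvSliceToList text c e, he])
    simp [hP, beq_eq_false_iff_ne.mpr hs]

lemma pvPred_ent_iff (text : String) (a b j i : ℕ) :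
    ((fun se => PySem.Str.slice text (some se.1) (some (se.2 + 1))
        == PySem.Str.slice text (some (j : ℤ)) (some ((i : ℤ) + 1)))
      ∘ (fun x : (ℤ × ℤ) × List (String × ℤ) => x.1)) (pvEnt a b)
      = decide (pvSub text.toList a b = pvSub text.toList j i) := by
  show (PySem.Str.slice text (some ((a : ℕ) : ℤ)) (some (((b : ℕ) : ℤ) + 1))
      == PySem.Str.slice text (some (j : ℤ)) (some ((i : ℤ) + 1))) = _
  exact pvSliceEq text a b j i

lemma mem_pvRow {cs : List Char} {i t : ℕ} {e : (Int × Int) × List (String × Int)} :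
    e ∈ pvRow cs i t ↔ ∃ j, j < t ∧ pvNew cs j i = true ∧ e = pvEnt j i := by
  simp only [pvRow, List.mem_filterMap, List.mem_range]
  constructor
  · rintro ⟨j, hj, he⟩
    by_cases hn : pvNew cs j i = true
    · rw [if_pos hn] at he
      exact ⟨j, hj, hn, (Option.some_inj.mp he).symm⟩
    · rw [if_neg hn] at he
      cases he
  · rintro ⟨j, hj, hn, he⟩
    exact ⟨j, hj, by rw [if_pos hn, he]⟩

lemma mem_pvUp {cs : List Char} {m : ℕ} {e : (Int × Int) × List (String × Int)} :
    e ∈ pvUp cs m ↔ ∃ i j, 1 ≤ i ∧ i < 1 + m ∧ j ≤ i ∧ pvNew cs j i = true ∧ e = pvEnt j i := by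
  simp only [pvUp, List.mem_flatMap, List.mem_range'_1]
  constructor
  · rintro ⟨i, ⟨hi1, hi2⟩, hmem⟩
    obtain ⟨j, hj, hn, he⟩ := mem_pvRow.mp hmem
    exact ⟨i, j, hi1, hi2, by omega, hn, he⟩
  · rintro ⟨i, j, hi1, hi2, hj, hn, he⟩
    exact ⟨i, ⟨hi1, hi2⟩, mem_pvRow.mpr ⟨j, by omega, hn, he⟩⟩

lemma pvFlag {text : String} {i j : ℕ} (hi1 : 1 ≤ i) (hi : i < text.toList.length) (hj : j ≤ i)
    (d : PySem.Dict (Int × Int) (List (String × Int)))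
    (hd : d.items = pvEnt 0 0 :: (pvUp text.toList (i - 1) ++ pvRow text.toList i j)) :
    (d.keys.any (fun se =>
       PySem.Str.slice text (some se.1) (some (se.2 + 1))
         == PySem.Str.slice text (some (j : ℤ)) (some ((i : ℤ) + 1))))
      = !pvNew text.toList j i := by
  set cs := text.toList with hcs
  have hkeys : d.keys = (pvEnt 0 0 :: (pvUp cs (i - 1) ++ pvRow cs i j)).map (fun x => x.1) := by
    simp [PySem.Dict.keys, hd]
  have hiff : (d.keys.any (fun se =>
       PySem.Str.slice text (some se.1) (some (se.2 + 1))
         == PySem.Str.slice text (some (j : ℤ)) (some ((i : ℤ) + 1)))) = true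
      ↔ ∃ p < j, pvSub cs j i <+: cs.drop p := by
    rw [hkeys, List.any_map, List.any_eq_true]
    constructor
    · rintro ⟨x, hx, hpx⟩
      rcases List.mem_cons.mp hx with rfl | hx'
      · -- key (0, 0)
        rw [pvPred_ent_iff] at hpx
        have heq : pvSub cs 0 0 = pvSub cs j i := of_decide_eq_true hpx
        have hl0 : (pvSub cs 0 0).length = 1 := pvSub_len (le_refl 0) (by omega)
        have hlji : (pvSub cs j i).length = i + 1 - j := pvSub_len hj hi
        have hji : j = i := by rw [heq] at hl0; omega
        refine ⟨0, by omega, ?_⟩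
        rw [← heq]
        simpa using pvSub_prefix cs 0 0
      · rcases List.mem_append.mp hx' with hu | hr
        · obtain ⟨i', j', hi'1, hi'2, hj', hn', hx⟩ := mem_pvUp.mp hu
          subst hx
          rw [pvPred_ent_iff] at hpx
          have heq : pvSub cs j' i' = pvSub cs j i := of_decide_eq_true hpx
          have hii : i' < i := by omega
          have hl1 : (pvSub cs j' i').length = i' + 1 - j' := pvSub_len hj' (by omega)
          have hl2 : (pvSub cs j i).length = i + 1 - j := pvSub_len hj hi
          have hlen : i' + 1 - j' = i + 1 - j := by rw [← hl1, ← hl2, heq]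
          refine ⟨j', by omega, ?_⟩
          rw [← heq]
          exact pvSub_prefix cs j' i'
        · obtain ⟨j', hj', hn', hx⟩ := mem_pvRow.mp hr
          subst hx
          rw [pvPred_ent_iff] at hpx
          have heq : pvSub cs j' i = pvSub cs j i := of_decide_eq_true hpx
          have hl1 : (pvSub cs j' i).length = i + 1 - j' := pvSub_len (by omega) hi
          have hl2 : (pvSub cs j i).length = i + 1 - j := pvSub_len hj hi
          have : j' = j := by rw [← heq] at hl2; omega
          omega
    · rintro ⟨p, hp, hocc⟩
      have hQ : ∃ r, pvSub cs j i <+: cs.drop r := ⟨p, hocc⟩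
      have hq : pvSub cs j i <+: cs.drop (Nat.find hQ) := Nat.find_spec hQ
      have hqp : Nat.find hQ ≤ p := Nat.find_min' hQ hocc
      have hqj : Nat.find hQ < j := by omega
      have heq : pvSub cs (Nat.find hQ) (Nat.find hQ + (i - j)) = pvSub cs j i :=
        pvSub_eq_of_prefix hj hi hq
      by_cases h0 : Nat.find hQ + (i - j) = 0
      · refine ⟨pvEnt 0 0, List.mem_cons_self, ?_⟩
        rw [pvPred_ent_iff]
        apply decide_eq_true
        have hq0 : Nat.find hQ = 0 := by omega
        have hij : i - j = 0 := by omega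
        rw [← heq, hq0, hij]
      · refine ⟨pvEnt (Nat.find hQ) (Nat.find hQ + (i - j)), ?_, ?_⟩
        · apply List.mem_cons_of_mem
          apply List.mem_append_left
          apply mem_pvUp.mpr
          refine ⟨Nat.find hQ + (i - j), Nat.find hQ, by omega, by omega, by omega, ?_, rfl⟩
          apply decide_eq_true
          intro r hr hrp
          rw [heq] at hrp
          exact Nat.find_min hQ hr hrp
        · rw [pvPred_ent_iff]
          exact decide_eq_true heq
  rcases hn : pvNew cs j i with _ | _
  · have hex : ∃ p < j, pvSub cs j i <+: cs.drop p := by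
      have := of_decide_eq_false hn
      push_neg at this
      obtain ⟨p, hp, hpp⟩ := this
      exact ⟨p, hp, hpp⟩
    simp only [Bool.not_false]
    exact hiff.mpr hex
  · have hnex : ¬ ∃ p < j, pvSub cs j i <+: cs.drop p := by
      have := of_decide_eq_true hn
      rintro ⟨p, hp, hpp⟩
      exact this p hp hpp
    simp only [Bool.not_true]
    rw [← Bool.not_eq_true]
    rw [hiff]
    exact hnex

lemma pvRow_succ (cs : List Char) (i t : ℕ) :
    pvRow cs i (t + 1) = pvRow cs i t ++ (if pvNew cs t i then [pvEnt t i] else []) := by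
  rw [pvRow, List.range_succ, List.filterMap_append]
  rcases h : pvNew cs t i with _ | _ <;> simp [pvRow, h]

lemma pvInsert_items {text : String} {i t : ℕ} (hi1 : 1 ≤ i) (hti : t ≤ i)
    (d : PySem.Dict (Int × Int) (List (String × Int)))
    (hd : d.items = pvEnt 0 0 :: (pvUp text.toList (i - 1) ++ pvRow text.toList i t)) :
    (d.insert ((t : ℤ), (i : ℤ)) [("leaf", (t : ℤ))]).items
      = pvEnt 0 0 :: (pvUp text.toList (i - 1) ++ (pvRow text.toList i t ++ [pvEnt t i])) := by
  set cs := text.toList with hcs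
  have hc : d.contains ((t : ℤ), (i : ℤ)) = false := by
    rw [PySem.Dict.contains_eq_decide_mem_keys]
    apply decide_eq_false
    intro hmem
    have hkeys : d.keys = (pvEnt 0 0 :: (pvUp cs (i - 1) ++ pvRow cs i t)).map (fun x => x.1) := by
      simp [PySem.Dict.keys, hd]
    rw [hkeys] at hmem
    obtain ⟨x, hx, hx1⟩ := List.mem_map.mp hmem
    rcases List.mem_cons.mp hx with rfl | hx'
    · simp only [pvEnt, Prod.mk.injEq] at hx1
      omega
    · rcases List.mem_append.mp hx' with hu | hr
      · obtain ⟨i', j', hi'1, hi'2, hj', _, hxe⟩ := mem_pvUp.mp hu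
        subst hxe
        simp only [pvEnt, Prod.mk.injEq] at hx1
        omega
      · obtain ⟨j', hj', _, hxe⟩ := mem_pvRow.mp hr
        subst hxe
        simp only [pvEnt, Prod.mk.injEq] at hx1
        omega
  rw [PySem.Dict.items_insert_of_not_contains _ _ hc, hd]
  simp [pvEnt]

lemma pvInnerA (text : String) {i : ℕ} (hi1 : 1 ≤ i) (hi : i < text.toList.length) :
    ∀ t, t ≤ i + 1 → ∀ d : PySem.Dict (Int × Int) (List (String × Int)),
    d.items = pvEnt 0 0 :: pvUp text.toList (i - 1) →
    ((List.range t).foldl (fun st (k : ℕ) => pvStepA text (i : ℤ) st ((0 : ℤ) + (k : ℤ))) d).items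
      = pvEnt 0 0 :: (pvUp text.toList (i - 1) ++ pvRow text.toList i t) := by
  intro t
  induction t with
  | zero =>
    intro _ d hd
    simpa [pvRow] using hd
  | succ t ih =>
    intro ht d hd
    rw [List.range_succ, List.foldl_append]
    have hitems := ih (by omega) d hd
    set d' := (List.range t).foldl (fun st (k : ℕ) => pvStepA text (i : ℤ) st ((0 : ℤ) + (k : ℤ))) d with hd'
    simp only [List.foldl_cons, List.foldl_nil]
    rw [pvStepA]
    have hflag := pvFlag hi1 hi (by omega : t ≤ i) d' hitems
    have hz : ((0 : ℤ) + (t : ℤ)) = ((t : ℕ) : ℤ) := by ring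
    rw [hz]
    rcases hn : pvNew text.toList t i with _ | _
    · rw [hn] at hflag
      rw [hflag, if_neg (by simp), hitems, pvRow_succ, hn]
      simp
    · rw [hn] at hflag
      rw [hflag, if_pos (by simp), pvInsert_items hi1 (by omega) d' hitems, pvRow_succ, hn]
      simp

lemma pvUp_succ (cs : List Char) (m : ℕ) :
    pvUp cs (m + 1) = pvUp cs m ++ pvRow cs (1 + m) (1 + m + 1) := by
  rw [pvUp, pvUp, List.range'_1_concat, List.flatMap_append]
  simp

lemma pvOuterA (text : String) :
    ∀ m, m ≤ text.toList.length - 1 →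
    ∀ d : PySem.Dict (Int × Int) (List (String × Int)),
    d.items = [pvEnt 0 0] →
    (((List.range m).map (fun (k : ℕ) => (1 : ℤ) + (k : ℤ))).foldl
       (fun st i => (PySem.List.pyRange 0 (i + 1)).foldl (pvStepA text i) st) d).items
      = pvEnt 0 0 :: pvUp text.toList m := by
  intro m
  induction m with
  | zero =>
    intro _ d hd
    simpa [pvUp] using hd
  | succ m ih =>
    intro hm d hd
    rw [List.range_succ, List.map_append, List.foldl_append]
    have hitems := ih (by omega) d hd
    set d' := (((List.range m).map (fun (k : ℕ) => (1 : ℤ) + (k : ℤ))).foldl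
       (fun st i => (PySem.List.pyRange 0 (i + 1)).foldl (pvStepA text i) st) d) with hd'
    simp only [List.map_cons, List.map_nil, List.foldl_cons, List.foldl_nil]
    have hcast : ((1 : ℤ) + (m : ℤ)) = ((1 + m : ℕ) : ℤ) := by push_cast; ring
    have hlen : 1 + m < text.toList.length := by omega
    have hrange : PySem.List.pyRange 0 (((1 : ℤ) + (m : ℤ)) + 1)
        = (List.range (1 + m + 1)).map (fun (k : ℕ) => (0 : ℤ) + (k : ℤ)) := by
      rw [PySem.List.pyRange_one]
      have h' : ((1 : ℤ) + (m : ℤ) + 1 - 0).toNat = 1 + m + 1 := by omega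
      rw [h']
    rw [hrange, hcast, List.foldl_map]
    have := pvInnerA text (by omega : 1 ≤ 1 + m) hlen (1 + m + 1) (by omega) d'
      (by rw [hitems]; congr 1; congr 1; omega)
    rw [this]
    rw [pvUp_succ]
    simp

lemma pvD0_items (text : String) :
    ((PySem.Dict.empty.insert ((0 : ℤ), (0 : ℤ)) [("leaf", (0 : ℤ))] :
        PySem.Dict (Int × Int) (List (String × Int)))).items = [pvEnt 0 0] := by
  rw [PySem.Dict.items_insert_of_not_contains _ _ (PySem.Dict.contains_empty _)]
  simp [PySem.Dict.empty, pvEnt]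

lemma pvA_items (text : String) :
    naive_implicit_suffix_tree text
      = (pvEnt 0 0 :: pvUp text.toList (text.toList.length - 1)).map
          (fun kv => (kv.1.1, kv.1.2, kv.2)) := by
  rw [naive_implicit_suffix_tree]
  simp only [PySem.Str.len_eq]
  have hrange : PySem.List.pyRange 1 (text.toList.length : ℤ)
      = (List.range (text.toList.length - 1)).map (fun (k : ℕ) => (1 : ℤ) + (k : ℤ)) := by
    rw [PySem.List.pyRange_one]
    have h' : ((text.toList.length : ℤ) - 1).toNat = text.toList.length - 1 := by omega
    rw [h']
  rw [hrange]
  rw [pvOuterA text (text.toList.length - 1) (le_refl _) _ (pvD0_items text)]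

-- ===== B side =====

lemma pvUpdate_append {κ ν : Type} [BEq κ] (d : PySem.Dict κ ν) (xs ys : List (κ × ν)) :
    d.update (xs ++ ys) = (d.update xs).update ys := by
  simp [PySem.Dict.update, List.foldl_append]

lemma pvUpdRow (text : String) {i : ℕ} (hi1 : 1 ≤ i) (hi : i < text.toList.length) :
    ∀ t, t ≤ i + 1 → ∀ d : PySem.Dict (Int × Int) (List (String × Int)),
    d.items = pvEnt 0 0 :: pvUp text.toList (i - 1) →
    (d.update (pvRow text.toList i t)).items
      = pvEnt 0 0 :: (pvUp text.toList (i - 1) ++ pvRow text.toList i t) := by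
  intro t
  induction t with
  | zero =>
    intro _ d hd
    simpa [pvRow, PySem.Dict.update] using hd
  | succ t ih =>
    intro ht d hd
    rw [pvRow_succ, pvUpdate_append]
    have hitems := ih (by omega) d hd
    rcases hn : pvNew text.toList t i with _ | _
    · have hif : (if (false : Bool) = true then [pvEnt t i]
          else ([] : List ((ℤ × ℤ) × List (String × ℤ)))) = [] := by simp
      rw [hif]
      have h0 : PySem.Dict.update (d.update (pvRow text.toList i t)) [] =
          d.update (pvRow text.toList i t) := rfl
      rw [h0, hitems]
      simp
    · have hif : (if (true : Bool) = true then [pvEnt t i]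
          else ([] : List ((ℤ × ℤ) × List (String × ℤ)))) = [pvEnt t i] := by simp
      rw [hif]
      have hstep : (PySem.Dict.update (d.update (pvRow text.toList i t)) [pvEnt t i])
          = (d.update (pvRow text.toList i t)).insert ((t : ℤ), (i : ℤ)) [("leaf", (t : ℤ))] := rfl
      rw [hstep, pvInsert_items hi1 (by omega) _ hitems]

lemma pvUpdOuter (text : String) :
    ∀ m, m ≤ text.toList.length - 1 →
    ∀ d : PySem.Dict (Int × Int) (List (String × Int)),
    d.items = [pvEnt 0 0] →
    (d.update (pvUp text.toList m)).items = pvEnt 0 0 :: pvUp text.toList m := by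
  intro m
  induction m with
  | zero =>
    intro _ d hd
    simpa [pvUp, PySem.Dict.update] using hd
  | succ m ih =>
    intro hm d hd
    rw [pvUp_succ, pvUpdate_append]
    have hitems := ih (by omega) d hd
    have hlen : 1 + m < text.toList.length := by omega
    have := pvUpdRow text (by omega : 1 ≤ 1 + m) hlen (1 + m + 1) (by omega)
      (d.update (pvUp text.toList m))
      (by rw [hitems]; congr 2; omega)
    rw [this]
    have h1m : 1 + m - 1 = m := by omega
    rw [h1m]

lemma pvB_upd (text : String) :
    ((PySem.List.pyRange 1 ((text.toList.length : ℕ) : ℤ)).flatMap (fun i =>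
      (PySem.List.pyRange 0 (i + 1)).filterMap (fun j =>
        if PySem.Str.find text (PySem.Str.slice text (some j) (some (i + 1))) == j
        then some ((j, i), [("leaf", j)]) else none)))
      = pvUp text.toList (text.toList.length - 1) := by
  set cs := text.toList with hcs
  rw [PySem.List.pyRange_one]
  have hlen : (((cs.length : ℕ) : ℤ) - 1).toNat = cs.length - 1 := by omega
  rw [hlen, List.flatMap_map]
  rw [pvUp, List.range'_eq_map_range, List.flatMap_map]
  apply List.flatMap_congr
  intro k hk
  have hk' : k < cs.length - 1 := List.mem_range.mp hk
  have hcast : ((1 : ℤ) + (k : ℤ)) = ((1 + k : ℕ) : ℤ) := by push_cast; ring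
  have hrange : PySem.List.pyRange 0 (((1 : ℤ) + (k : ℤ)) + 1)
      = (List.range (1 + k + 1)).map (fun (j : ℕ) => (0 : ℤ) + (j : ℤ)) := by
    rw [PySem.List.pyRange_one]
    have h' : ((1 : ℤ) + (k : ℤ) + 1 - 0).toNat = 1 + k + 1 := by omega
    rw [h']
  rw [hrange, List.filterMap_map]
  rw [pvRow]
  apply List.filterMap_congr
  intro j hj
  have hj' : j < 1 + k + 1 := List.mem_range.mp hj
  have hz : ((0 : ℤ) + (j : ℤ)) = ((j : ℕ) : ℤ) := by ring
  simp only [Function.comp]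
  rw [hz, hcast]
  have hcond := pvCondB text (i := 1 + k) (j := j) (by omega) (by rw [← hcs]; omega)
  rw [hcond]
  rcases hn : pvNew cs j (1 + k) with _ | _
  · simp
  · simp [pvEnt]

lemma pvB_items (text : String) :
    naive_implicit_suffix_tree_alt text
      = (pvEnt 0 0 :: pvUp text.toList (text.toList.length - 1)).map
          (fun kv => (kv.1.1, kv.1.2, kv.2)) := by
  rw [naive_implicit_suffix_tree_alt]
  simp only [PySem.Str.len_eq]
  rw [pvB_upd text]
  rw [pvUpdOuter text (text.toList.length - 1) (le_refl _) _ (pvD0_items text)]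

-- ===== VERDICT (by name: the statement is the Claim_ definition above) =====
theorem naive_implicit_suffix_tree_spec : Claim_equal_naive_implicit_suffix_tree := by
  intro text _
  unfold Spec_naive_implicit_suffix_tree
  rw [pvA_items, pvB_items]
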